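-- pv_equiv track=rewrite | github.com/Lightless-Labs/third-thoughts | scripts/tpattern_detection.py | count_pattern_occurrences
-- ===== SOURCE A (Python) =====
-- def count_pattern_occurrences(events_a, events_b, critical_interval):
--     """Count how many times B follows A within the critical interval."""
--     if critical_interval is None:
--         return 0
--
--     d1, d2 = critical_interval
--     import bisect
--     b_times = sorted(events_b)
--     count = 0
--
--     for ta in events_a:
--         target_start = ta + d1
--         target_end = ta + d2
--         # Find B occurrences in [ta+d1, ta+d2]
--         idx_start = bisect.bisect_left(b_times, target_start)
--         idx_end = bisect.bisect_right(b_times, target_end)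
--         if idx_end > idx_start:
--             count += 1  # At least one B in the interval
--
--     return count
-- ===== SOURCE B (Python) =====
-- def _has_b_in_window(events_b, lo, hi):
--     """True iff some B event lies in [lo, hi]."""
--     return any(lo <= tb <= hi for tb in events_b)
--
--
-- def count_pattern_occurrences(events_a, events_b, critical_interval):
--     """Count how many times B follows A within the critical interval."""
--     if critical_interval is None:
--         return 0
--     d1, d2 = critical_interval
--     matched = [ta for ta in events_a
--                if _has_b_in_window(events_b, ta + d1, ta + d2)]
--     return len(matched)
-- ===== Notes on version B (the rewrite author's own statement) =====
-- stated objective: simpler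
-- what changed: Replaced the sorted copy of events_b plus two binary searches and a counting accumulator per A-event with a direct window-membership scan used as a filter predicate over events_a, returning the length of the filtered list; no bisect, no sort, no running counter.
import Mathlib
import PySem

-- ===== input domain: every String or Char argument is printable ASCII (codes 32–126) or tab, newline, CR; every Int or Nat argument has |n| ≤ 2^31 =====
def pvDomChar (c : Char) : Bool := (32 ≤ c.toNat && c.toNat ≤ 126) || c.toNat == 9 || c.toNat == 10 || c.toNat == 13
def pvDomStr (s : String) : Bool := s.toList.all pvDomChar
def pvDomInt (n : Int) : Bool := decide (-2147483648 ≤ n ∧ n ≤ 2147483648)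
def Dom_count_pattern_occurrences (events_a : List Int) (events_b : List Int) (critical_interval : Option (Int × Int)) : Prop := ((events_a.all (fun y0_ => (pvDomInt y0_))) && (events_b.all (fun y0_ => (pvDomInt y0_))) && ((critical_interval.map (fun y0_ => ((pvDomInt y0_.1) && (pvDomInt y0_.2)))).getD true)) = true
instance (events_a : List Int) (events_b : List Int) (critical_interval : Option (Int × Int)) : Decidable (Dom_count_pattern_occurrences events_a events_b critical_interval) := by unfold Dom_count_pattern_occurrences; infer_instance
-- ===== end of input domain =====

-- ===== PORT A =====
def count_pattern_occurrences (events_a : List Int) (events_b : List Int) (critical_interval : Option (Int × Int)) : Int :=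
  match critical_interval with
  | none => 0
  | some (d1, d2) =>
    let b_times := PySem.List.sorted events_b (fun x => x)
    events_a.foldl (fun count ta =>
      let target_start := ta + d1
      let target_end := ta + d2
      let idx_start := PySem.List.bisectLeft b_times target_start
      let idx_end := PySem.List.bisectRight b_times target_end
      if idx_start < idx_end then count + 1 else count) 0

-- ===== PORT B =====
-- B: filter events_a by a direct window-membership scan of the unsorted events_b, return the length.
def pvHasBInWindow (events_b : List Int) (lo hi : Int) : Bool :=
  events_b.any (fun tb => decide (lo ≤ tb) && decide (tb ≤ hi))

def count_pattern_occurrences_alt (events_a : List Int) (events_b : List Int) (critical_interval : Option (Int × Int)) : Int :=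
  match critical_interval with
  | none => 0
  | some (d1, d2) =>
    ((events_a.filter (fun ta => pvHasBInWindow events_b (ta + d1) (ta + d2))).length : Int)

-- ===== PRECONDITION & SPEC =====
def Spec_count_pattern_occurrences (events_a : List Int) (events_b : List Int) (critical_interval : Option (Int × Int)) (out : Int) : Prop := out = count_pattern_occurrences_alt events_a events_b critical_interval
instance (events_a : List Int) (events_b : List Int) (critical_interval : Option (Int × Int)) (out : Int) : Decidable (Spec_count_pattern_occurrences events_a events_b critical_interval out) := by unfold Spec_count_pattern_occurrences; infer_instance

-- ===== CLAIM (what is proved, stated in full; the proofs are below) =====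
def Claim_equal_count_pattern_occurrences : Prop := ∀ (events_a : List Int) (events_b : List Int) (critical_interval : Option (Int × Int)), Dom_count_pattern_occurrences events_a events_b critical_interval → Spec_count_pattern_occurrences events_a events_b critical_interval (count_pattern_occurrences events_a events_b critical_interval)

-- ===== LEMMAS AND PROOFS =====

-- A's bisect window test equals B's direct membership scan of the unsorted list.
theorem window_iff (eb : List Int) (s e : Int) :
    PySem.List.bisectLeft (PySem.List.sorted eb (fun x => x)) s <
      PySem.List.bisectRight (PySem.List.sorted eb (fun x => x)) e ↔
    ∃ x ∈ eb, s ≤ x ∧ x ≤ e := by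
  set bt := PySem.List.sorted eb (fun x => x) with hbt
  have hp : bt.Pairwise (fun a b => a ≤ b) := PySem.List.sorted_pairwise eb (fun x => x)
  have hL := PySem.List.bisectLeft_spec bt s hp
  have hR := PySem.List.bisectRight_spec bt e hp
  have hmem : ∀ x, x ∈ bt ↔ x ∈ eb := fun x =>
    (PySem.List.sorted_perm eb (fun x => x) false).mem_iff
  constructor
  · intro hlt
    have hlen : PySem.List.bisectLeft bt s < bt.length := lt_of_lt_of_le hlt hR.1
    refine ⟨bt[PySem.List.bisectLeft bt s], (hmem _).mp (List.getElem_mem hlen), ?_, ?_⟩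
    · exact hL.2.2 _ hlen le_rfl
    · exact hR.2.1 _ hlen hlt
  · rintro ⟨x, hx, hs, he⟩
    obtain ⟨j, hj, rfl⟩ := List.mem_iff_getElem.mp ((hmem x).mpr hx)
    have h1 : PySem.List.bisectLeft bt s ≤ j := by
      by_contra h
      exact absurd hs (not_le.mpr (hL.2.1 j hj (not_le.mp h)))
    have h2 : j < PySem.List.bisectRight bt e := by
      by_contra h
      exact absurd he (not_le.mpr (hR.2.2 j hj (not_lt.mp h)))
    omega

-- A's counting fold over a boolean predicate equals the length of the filtered list, as Int.
theorem foldl_count_eq_filter_length (l : List Int) (p : Int → Bool) (c : Int) :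
    l.foldl (fun count ta => if p ta then count + 1 else count) c
      = c + ((l.filter p).length : Int) := by
  induction l generalizing c with
  | nil => simp
  | cons x xs ih =>
    by_cases h : p x <;> simp [List.foldl, List.filter, h, ih] <;> ring

-- ===== VERDICT (by name: the statement is the Claim_ definition above) =====
theorem count_pattern_occurrences_spec : Claim_equal_count_pattern_occurrences := by
  intro events_a events_b critical_interval _
  unfold Spec_count_pattern_occurrences count_pattern_occurrences count_pattern_occurrences_alt
  match critical_interval with
  | none => rfl
  | some (d1, d2) =>
    simp only []
    have := foldl_count_eq_filter_length events_a
      (fun ta => decide (PySem.List.bisectLeft (PySem.List.sorted events_b (fun x => x)) (ta + d1) <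
        PySem.List.bisectRight (PySem.List.sorted events_b (fun x => x)) (ta + d2))) 0
    rw [show (fun (count : Int) ta =>
        let target_start := ta + d1
        let target_end := ta + d2
        let idx_start := PySem.List.bisectLeft (PySem.List.sorted events_b (fun x => x)) target_start
        let idx_end := PySem.List.bisectRight (PySem.List.sorted events_b (fun x => x)) target_end
        if idx_start < idx_end then count + 1 else count) =
      (fun count ta => if (decide (PySem.List.bisectLeft (PySem.List.sorted events_b (fun x => x)) (ta + d1) <
        PySem.List.bisectRight (PySem.List.sorted events_b (fun x => x)) (ta + d2))) then count + 1 else count)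
      from by funext c t; simp]
    rw [this, zero_add]
    congr 2
    apply List.filter_congr
    intro ta _
    have h := window_iff events_b (ta + d1) (ta + d2)
    rw [Bool.eq_iff_iff]
    simp [pvHasBInWindow, h]
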